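-- pv_equiv track=rewrite | github.com/kry137/python-tools | smartrenamer/SmartRenamer.py | Rename
-- ===== SOURCE A (Python) =====
-- TargetToRename = ["[Kusonime] ", "_Kuso__", "Otakudesu.net_", "Otakudesu_", "[KurumiNime] "]
--
-- def Rename(filename):
--     splited = ""
--     for char in filename:
--         splited += char
--         if splited in TargetToRename: #Apakah file akan di-rename
--             nameRenamed = filename.split(splited)
--             return nameRenamed[1]
--     return None #Jika nama tidak perlu diubah
-- ===== SOURCE B (Python) =====
-- TargetToRename = ["[Kusonime] ", "_Kuso__", "Otakudesu.net_", "Otakudesu_", "[KurumiNime] "]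
--
-- def Rename(filename):
--     # Scan candidate prefixes instead of building the prefix character by character.
--     for t in TargetToRename:
--         if filename.startswith(t):
--             return filename.split(t)[1]
--     return None
-- ===== Notes on version B (the rewrite author's own statement) =====
-- stated objective: simpler
-- what changed: Instead of assembling the filename's prefix one character at a time and testing each partial string for list membership, B loops once over the five candidate targets and uses startswith; valid because no target is a prefix of another, so at most one candidate matches.
import Mathlib
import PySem

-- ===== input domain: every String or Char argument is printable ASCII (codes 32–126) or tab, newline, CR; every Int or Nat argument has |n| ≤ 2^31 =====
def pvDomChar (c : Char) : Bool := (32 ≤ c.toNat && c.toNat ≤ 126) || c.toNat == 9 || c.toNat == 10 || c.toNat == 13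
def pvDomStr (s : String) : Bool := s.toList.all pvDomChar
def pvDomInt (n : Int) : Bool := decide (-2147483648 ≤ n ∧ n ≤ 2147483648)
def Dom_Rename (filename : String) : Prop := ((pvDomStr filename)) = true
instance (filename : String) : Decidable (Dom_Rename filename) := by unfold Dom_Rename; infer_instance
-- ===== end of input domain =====

-- B replaces A's character-by-character prefix assembly + list-membership test by a single
-- scan over the five candidate targets using startswith (simpler; same result because no
-- target is a prefix of another).


-- ===== PORT A =====
def pvTargets : List String := ["[Kusonime] ", "_Kuso__", "Otakudesu.net_", "Otakudesu_", "[KurumiNime] "]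

-- A's loop: `splited` grows one char at a time; on membership, return filename.split(splited)[1].
-- (split never gets an empty separator here, and [1] always exists, so the `none` fallbacks are unreachable.)
def pvLoopA (filename : String) : List Char → List Char → Option String
  | _acc, [] => none
  | acc, c :: rest =>
    let splited := acc ++ [c]
    if String.ofList splited ∈ pvTargets then
      match PySem.Str.split? filename (String.ofList splited) with
      | some nameRenamed => PySem.List.pyGet? nameRenamed 1
      | none => none
    else pvLoopA filename splited rest

def Rename (filename : String) : Option String := pvLoopA filename [] filename.toList

-- ===== PORT B =====
def pvLoopB (filename : String) : List String → Option String
  | [] => none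
  | t :: ts =>
    if PySem.Str.startswith filename t then
      match PySem.Str.split? filename t with
      | some parts => PySem.List.pyGet? parts 1
      | none => none
    else pvLoopB filename ts

def Rename_alt (filename : String) : Option String := pvLoopB filename pvTargets

-- ===== PRECONDITION & SPEC =====
def Spec_Rename (filename : String) (out : Option String) : Prop := out = Rename_alt filename
instance (filename : String) (out : Option String) : Decidable (Spec_Rename filename out) := by unfold Spec_Rename; infer_instance

-- ===== CLAIM (what is proved, stated in full; the proofs are below) =====
def Claim_equal_Rename : Prop := ∀ (filename : String), Dom_Rename filename → Spec_Rename filename (Rename filename)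

-- ===== LEMMAS AND PROOFS =====

-- No target is a (strict or non-strict) prefix of a different target.
lemma pvTargets_no_prefix : ∀ t1 ∈ pvTargets, ∀ t2 ∈ pvTargets, t1.toList <+: t2.toList → t1 = t2 := by
  decide

-- Hence at most one target is a prefix of any given string.
lemma pvTargets_uniq {fn : List Char} {t1 t2 : String} (h1 : t1 ∈ pvTargets) (h2 : t2 ∈ pvTargets)
    (p1 : t1.toList <+: fn) (p2 : t2.toList <+: fn) : t1 = t2 := by
  rcases List.prefix_or_prefix_of_prefix p1 p2 with h | h
  · exact pvTargets_no_prefix t1 h1 t2 h2 h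
  · exact (pvTargets_no_prefix t2 h2 t1 h1 h).symm

lemma pvLoopA_none (filename : String) (rest acc : List Char)
    (hcat : acc ++ rest = filename.toList)
    (hno : ∀ t ∈ pvTargets, ¬ t.toList <+: filename.toList) :
    pvLoopA filename acc rest = none := by
  induction rest generalizing acc with
  | nil => rfl
  | cons c rest ih =>
    have hpre : (acc ++ [c]) <+: filename.toList := by
      refine ⟨rest, ?_⟩; simpa using hcat
    have hmem : String.ofList (acc ++ [c]) ∉ pvTargets := by
      intro hmem
      exact hno _ hmem (by simpa using hpre)
    simp only [pvLoopA, if_neg hmem]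
    exact ih (acc ++ [c]) (by simpa using hcat)

lemma pvLoopB_none (filename : String) (ts : List String)
    (hsub : ∀ t ∈ ts, t ∈ pvTargets)
    (hno : ∀ t ∈ pvTargets, ¬ t.toList <+: filename.toList) :
    pvLoopB filename ts = none := by
  induction ts with
  | nil => rfl
  | cons t ts ih =>
    have hsw : PySem.Str.startswith filename t = false := by
      rw [PySem.Str.startswith_eq]
      rcases h : PySem.Chars.startswith filename.toList t.toList with _ | _
      · rfl
      · exact absurd ((PySem.Chars.startswith_iff _ _).mp h) (hno t (hsub t (List.mem_cons_self)))
    simp only [pvLoopB, hsw, Bool.false_eq_true, if_false]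
    exact ih (fun x hx => hsub x (List.mem_cons_of_mem _ hx))

lemma pvLoopA_fires (filename : String) (t : String) (ht : t ∈ pvTargets)
    (hpre : t.toList <+: filename.toList) (rest acc : List Char)
    (hcat : acc ++ rest = filename.toList) (hlen : acc.length < t.toList.length) :
    pvLoopA filename acc rest =
      match PySem.Str.split? filename t with
      | some parts => PySem.List.pyGet? parts 1
      | none => none := by
  induction rest generalizing acc with
  | nil =>
    exfalso
    have := hpre.length_le
    simp only [← hcat, List.append_nil] at this hlen ⊢
    omega
  | cons c rest ih =>
    have hpre' : (acc ++ [c]) <+: filename.toList := by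
      refine ⟨rest, ?_⟩; simpa using hcat
    by_cases hmem : String.ofList (acc ++ [c]) ∈ pvTargets
    · have heq : String.ofList (acc ++ [c]) = t :=
        pvTargets_uniq hmem ht (by simpa using hpre') hpre
      simp only [pvLoopA, heq, if_pos ht]
    · simp only [pvLoopA, if_neg hmem]
      have hlt : (acc ++ [c]).length < t.toList.length := by
        rcases Nat.lt_or_ge (acc.length + 1) t.toList.length with h | h
        · simpa using h
        · exfalso
          have hle : (acc ++ [c]).length = t.toList.length := by
            simp only [List.length_append, List.length_cons, List.length_nil]; omega
          have : (acc ++ [c]) = t.toList := by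
            rcases List.prefix_or_prefix_of_prefix (by simpa using hpre' : (acc ++ [c]) <+: filename.toList) hpre with hp | hp
            · exact hp.eq_of_length hle
            · exact (hp.eq_of_length hle.symm).symm
          apply hmem
          rw [this]
          simpa using ht
      exact ih (acc ++ [c]) (by simpa using hcat) hlt

lemma pvLoopB_fires (filename : String) (t : String) (ht0 : t ∈ pvTargets)
    (hpre : t.toList <+: filename.toList) (ts : List String)
    (hsub : ∀ x ∈ ts, x ∈ pvTargets) (htmem : t ∈ ts) :
    pvLoopB filename ts =
      match PySem.Str.split? filename t with
      | some parts => PySem.List.pyGet? parts 1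
      | none => none := by
  induction ts with
  | nil => exact absurd htmem (List.not_mem_nil)
  | cons x ts ih =>
    by_cases hsw : PySem.Str.startswith filename x = true
    · have hx : x ∈ pvTargets := hsub x List.mem_cons_self
      have hxpre : x.toList <+: filename.toList := by
        rw [PySem.Str.startswith_eq] at hsw
        exact (PySem.Chars.startswith_iff _ _).mp hsw
      have heq : x = t := pvTargets_uniq hx ht0 hxpre hpre
      rw [heq] at hsw
      simp only [pvLoopB, heq, if_pos hsw]
    · have hxt : x ≠ t := by
        intro h; apply hsw
        rw [h, PySem.Str.startswith_eq]
        exact (PySem.Chars.startswith_iff _ _).mpr hpre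
      have htmem' : t ∈ ts := by
        cases htmem with
        | head => exact absurd rfl hxt
        | tail _ h => exact h
      simp only [pvLoopB, hsw]
      exact ih (fun y hy => hsub y (List.mem_cons_of_mem _ hy)) htmem'

-- ===== VERDICT (by name: the statement is the Claim_ definition above) =====
theorem Rename_spec : Claim_equal_Rename := by
  intro filename _
  unfold Spec_Rename Rename Rename_alt
  by_cases hex : ∃ t ∈ pvTargets, t.toList <+: filename.toList
  · obtain ⟨t, ht, hpre⟩ := hex
    rw [pvLoopA_fires filename t ht hpre filename.toList [] (by simp)
        (by
          have hne : t.toList ≠ [] := by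
            revert ht; unfold pvTargets; intro ht; fin_cases ht <;> decide
          simp only [List.length_nil]
          exact List.length_pos_of_ne_nil hne),
      pvLoopB_fires filename t ht hpre pvTargets (fun x hx => hx) ht]
  · push Not at hex
    rw [pvLoopA_none filename filename.toList [] (by simp) hex,
        pvLoopB_none filename pvTargets (fun x hx => hx) hex]
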